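-- pv_equiv track=rewrite | github.com/42ndPerson/DirectTreePartition | Iowa.py | wasd_code_graph
-- ===== SOURCE A (Python) =====
-- def wasd_code_graph(s):
--     x = 0
--     y = 0
--     last = (x, y)
--     m = {last: 0}
--     next_id = 1
--     jump = False
--     edges = set()
--     for c in s:
--         if c == "a":
--             x -= 1
--         elif c == "d":
--             x += 1
--         elif c == "s":
--             y -= 1
--         elif c == "w":
--             y += 1
--         elif c == "j":
--             jump = True
--         elif c == " ":
--             if (x, y) not in m:
--                 m[(x, y)] = next_id
--                 next_id += 1
--             if jump:
--                 jump = False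
--             else:
--                 edges.add((m[last], m[(x, y)]))
--             last = (x, y)
--     return edges
-- ===== SOURCE B (Python) =====
-- def wasd_code_graph(s):
--     edges = set()
--     m = {(0, 0): 0}
--     next_id = 1
--     x = 0
--     y = 0
--     last = (0, 0)
--     for seg in s.split(" ")[:-1]:
--         x += seg.count("d") - seg.count("a")
--         y += seg.count("w") - seg.count("s")
--         if (x, y) not in m:
--             m[(x, y)] = next_id
--             next_id += 1
--         if "j" not in seg:
--             edges.add((m[last], m[(x, y)]))
--         last = (x, y)
--     return edges
-- ===== Notes on version B (the rewrite author's own statement) =====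
-- stated objective: faster
-- what changed: B replaces A's per-character six-way state machine by splitting the string on spaces and folding over the committed segments, getting each segment's net move from four character counts and its jump flag from a substring test.
import Mathlib
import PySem

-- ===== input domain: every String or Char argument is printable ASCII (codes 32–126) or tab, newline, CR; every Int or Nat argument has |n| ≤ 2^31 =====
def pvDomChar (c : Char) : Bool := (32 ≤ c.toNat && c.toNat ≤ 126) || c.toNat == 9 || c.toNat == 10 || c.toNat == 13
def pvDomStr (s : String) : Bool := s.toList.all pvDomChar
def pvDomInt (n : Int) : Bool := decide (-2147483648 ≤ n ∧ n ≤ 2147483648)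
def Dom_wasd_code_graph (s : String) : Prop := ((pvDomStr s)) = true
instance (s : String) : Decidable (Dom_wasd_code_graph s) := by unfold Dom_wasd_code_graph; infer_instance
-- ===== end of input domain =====

-- B replaces A's per-character state machine by a split-on-space pass over the committed
-- segments, computing each segment's net move with character counts (measured faster than A in a timing run).

-- ===== PORT A =====
-- state: (x, y, last, m, next_id, jump, edges)
abbrev WasdStA := Int × Int × (Int × Int) × PySem.Dict (Int × Int) Int × Int × Bool × PySem.Set (Int × Int)

-- dict lookups m[last] / m[(x,y)] use getD 0: the keys are always present at that point
-- (last and (x,y) are inserted before use), so Python's KeyError is unreachable.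
def wasdStepA (st : WasdStA) (c : Char) : WasdStA :=
  let (x, y, last, m, next_id, jump, edges) := st
  if c = 'a' then (x - 1, y, last, m, next_id, jump, edges)
  else if c = 'd' then (x + 1, y, last, m, next_id, jump, edges)
  else if c = 's' then (x, y - 1, last, m, next_id, jump, edges)
  else if c = 'w' then (x, y + 1, last, m, next_id, jump, edges)
  else if c = 'j' then (x, y, last, m, next_id, true, edges)
  else if c = ' ' then
    let m' := if m.contains (x, y) then m else m.insert (x, y) next_id
    let next_id' := if m.contains (x, y) then next_id else next_id + 1
    let edges' := if jump then edges else edges.add (m'.getD last 0, m'.getD (x, y) 0)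
    (x, y, (x, y), m', next_id', false, edges')
  else st

def wasd_code_graph (s : String) : List (Int × Int) :=
  let st := s.toList.foldl wasdStepA
    (0, 0, (0, 0), PySem.Dict.insert ∅ (0, 0) 0, 1, false, ([] : PySem.Set (Int × Int)))
  st.2.2.2.2.2.2

-- ===== PORT B =====
-- state: (x, y, m, next_id, last, edges)
abbrev WasdStB := Int × Int × PySem.Dict (Int × Int) Int × Int × (Int × Int) × PySem.Set (Int × Int)

def wasdStepB (st : WasdStB) (seg : String) : WasdStB :=
  let (x, y, m, next_id, last, edges) := st
  let x' := x + (PySem.Str.count seg "d" : Int) - (PySem.Str.count seg "a" : Int)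
  let y' := y + (PySem.Str.count seg "w" : Int) - (PySem.Str.count seg "s" : Int)
  let m' := if m.contains (x', y') then m else m.insert (x', y') next_id
  let next_id' := if m.contains (x', y') then next_id else next_id + 1
  let edges' := if PySem.Str.isIn "j" seg then edges
                else edges.add (m'.getD last 0, m'.getD (x', y') 0)
  (x', y', m', next_id', (x', y'), edges')

def wasd_code_graph_alt (s : String) : List (Int × Int) :=
  let segments := (PySem.Str.split? s " ").getD []
  let st := (PySem.List.slice segments none (some (-1))).foldl wasdStepB
    (0, 0, PySem.Dict.insert ∅ (0, 0) 0, 1, (0, 0), ([] : PySem.Set (Int × Int)))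
  st.2.2.2.2.2

-- ===== PRECONDITION & SPEC =====
def Spec_wasd_code_graph (s : String) (out : List (Int × Int)) : Prop := out = wasd_code_graph_alt s
instance (s : String) (out : List (Int × Int)) : Decidable (Spec_wasd_code_graph s out) := by unfold Spec_wasd_code_graph; infer_instance

-- ===== CLAIM (what is proved, stated in full; the proofs are below) =====
def Claim_equal_wasd_code_graph : Prop := ∀ (s : String), Dom_wasd_code_graph s → Spec_wasd_code_graph s (wasd_code_graph s)

-- ===== LEMMAS AND PROOFS =====

-- reference splitter: Python s.split(" ") on a char list
def wasdSplit : List Char → List (List Char)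
  | [] => [[]]
  | c :: r =>
    if c = ' ' then [] :: wasdSplit r
    else
      match wasdSplit r with
      | [] => [[c]]
      | p :: ps => (c :: p) :: ps

theorem wasdSplit_ne_nil (l : List Char) : wasdSplit l ≠ [] := by
  cases l with
  | nil => simp [wasdSplit]
  | cons c r =>
    simp only [wasdSplit]
    split
    · simp
    · split <;> simp

theorem wasdSplit_cons' (l : List Char) : ∃ p ps, wasdSplit l = p :: ps := by
  cases hr : wasdSplit l with
  | nil => exact absurd hr (wasdSplit_ne_nil l)
  | cons p ps => exact ⟨p, ps, rfl⟩

theorem splitOn_go_spec : ∀ (fuel : Nat) (l cur : List Char) (acc : List (List Char)),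
    l.length < fuel →
    PySem.Chars.splitOn.go [' '] fuel l cur acc =
      acc.reverse ++ (wasdSplit l).modifyHead (cur.reverse ++ ·) := by
  intro fuel
  induction fuel with
  | zero => intro l cur acc h; omega
  | succ f ih =>
    intro l cur acc h
    cases l with
    | nil => simp [PySem.Chars.splitOn.go, wasdSplit]
    | cons c rest =>
      by_cases hc : c = ' '
      · subst hc
        rw [PySem.Chars.splitOn.go]
        simp only [List.isPrefixOf, BEq.rfl, Bool.true_and, if_pos]
        rw [ih _ _ _ (by simpa using Nat.lt_of_succ_lt_succ h)]
        obtain ⟨p, ps, hps⟩ := wasdSplit_cons' rest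
        simp [wasdSplit, hps]
      · rw [PySem.Chars.splitOn.go]
        simp only [List.isPrefixOf]
        rw [if_neg (by simp; exact fun h' => hc h'.symm)]
        rw [ih _ _ _ (by simpa using Nat.lt_of_succ_lt_succ h)]
        obtain ⟨p, ps, hps⟩ := wasdSplit_cons' rest
        simp [wasdSplit, hc, hps]

theorem splitOn_eq_wasdSplit (l : List Char) :
    PySem.Chars.splitOn l [' '] = wasdSplit l := by
  rw [PySem.Chars.splitOn, splitOn_go_spec _ _ _ _ (by omega)]
  obtain ⟨p, ps, hps⟩ := wasdSplit_cons' l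
  simp [hps]

theorem count_go_spec (c : Char) : ∀ (fuel : Nat) (l : List Char) (acc : Nat),
    l.length ≤ fuel →
    PySem.Chars.count.go [c] fuel l acc = acc + l.count c := by
  intro fuel
  induction fuel with
  | zero =>
    intro l acc h
    cases l with
    | nil => simp [PySem.Chars.count.go]
    | cons d t => exact absurd h (by simp)
  | succ f ih =>
    intro l acc h
    cases l with
    | nil => simp [PySem.Chars.count.go]
    | cons d rest =>
      by_cases hc : c = d
      · subst hc
        rw [PySem.Chars.count.go]
        simp only [List.isPrefixOf, BEq.rfl, Bool.true_and, if_pos]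
        rw [ih _ _ (by simpa using Nat.le_of_succ_le_succ h)]
        simp [List.count_cons]
        omega
      · rw [PySem.Chars.count.go]
        simp only [List.isPrefixOf]
        rw [if_neg (by simp; exact hc)]
        rw [ih _ _ (by simpa using Nat.le_of_succ_le_succ h)]
        simp [List.count_cons]
        exact fun h' => hc h'.symm

theorem chars_count_singleton (c : Char) (l : List Char) :
    PySem.Chars.count l [c] = l.count c := by
  rw [PySem.Chars.count]
  simpa using count_go_spec c l.length l 0 le_rfl

theorem chars_isIn_singleton (c : Char) (l : List Char) :
    PySem.Chars.isIn [c] l = l.contains c := by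
  by_cases h : c ∈ l
  · have : [c] <:+: l := by
      obtain ⟨s, t, rfl⟩ := List.append_of_mem h
      exact ⟨s, t, by simp⟩
    simp [h, (PySem.Chars.isIn_iff_infix [c] l).mpr this]
  · have : ¬ [c] <:+: l := fun hi => h (hi.sublist.subset (by simp))
    simp [h, (PySem.Chars.isIn_eq_false_iff [c] l).mpr this]

theorem slice_neg_one {α : Type} (xs : List α) :
    PySem.List.slice xs none (some (-1)) = xs.dropLast := by
  cases xs with
  | nil => simp [PySem.List.slice, PySem.List.clampIdx]
  | cons a t =>
    simp [PySem.List.slice, PySem.List.clampIdx, List.dropLast_eq_take]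
    rw [if_neg (by omega)]
    omega

-- stepB, restated on char lists
def wasdStepB' (st : WasdStB) (seg : List Char) : WasdStB :=
  let (x, y, m, next_id, last, edges) := st
  let x' := x + (seg.count 'd' : Int) - (seg.count 'a' : Int)
  let y' := y + (seg.count 'w' : Int) - (seg.count 's' : Int)
  let m' := if m.contains (x', y') then m else m.insert (x', y') next_id
  let next_id' := if m.contains (x', y') then next_id else next_id + 1
  let edges' := if seg.contains 'j' then edges
                else edges.add (m'.getD last 0, m'.getD (x', y') 0)
  (x', y', m', next_id', (x', y'), edges')

theorem stepB_eq_stepB' (st : WasdStB) (seg : String) :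
    wasdStepB st seg = wasdStepB' st seg.toList := by
  obtain ⟨x, y, m, n, last, e⟩ := st
  simp [wasdStepB, wasdStepB', PySem.Str.count, PySem.Str.isIn,
    chars_count_singleton, chars_isIn_singleton]

-- folding A's step over a space-free segment only moves (x, y) and accumulates jump
theorem foldA_nospace : ∀ (seg : List Char), ' ' ∉ seg →
    ∀ (x y : Int) (last : Int × Int) (m : PySem.Dict (Int × Int) Int) (n : Int)
      (j : Bool) (e : PySem.Set (Int × Int)),
    List.foldl wasdStepA (x, y, last, m, n, j, e) seg =
      (x + (seg.count 'd' : Int) - (seg.count 'a' : Int),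
       y + (seg.count 'w' : Int) - (seg.count 's' : Int),
       last, m, n, j || seg.contains 'j', e) := by
  intro seg
  induction seg with
  | nil => intro _ x y last m n j e; simp
  | cons c rest ih =>
    intro hns x y last m n j e
    have hc : ¬ c = ' ' := fun h => hns (by simp [h])
    have hrest : ' ' ∉ rest := fun h => hns (by simp [h])
    simp only [List.foldl_cons]
    by_cases ha : c = 'a'
    · subst ha
      rw [show wasdStepA (x, y, last, m, n, j, e) 'a' = (x - 1, y, last, m, n, j, e) from rfl]
      rw [ih hrest]
      simp [List.count_cons] <;> omega
    · by_cases hd : c = 'd'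
      · subst hd
        rw [show wasdStepA (x, y, last, m, n, j, e) 'd' = (x + 1, y, last, m, n, j, e) from rfl]
        rw [ih hrest]
        simp [List.count_cons] <;> omega
      · by_cases hs : c = 's'
        · subst hs
          rw [show wasdStepA (x, y, last, m, n, j, e) 's' = (x, y - 1, last, m, n, j, e) from rfl]
          rw [ih hrest]
          simp [List.count_cons] <;> omega
        · by_cases hj : c = 'j'
          · subst hj
            rw [show wasdStepA (x, y, last, m, n, j, e) 'j' = (x, y, last, m, n, true, e) from rfl]
            rw [ih hrest]
            simp [List.count_cons]
          · by_cases hw : c = 'w'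
            · subst hw
              rw [show wasdStepA (x, y, last, m, n, j, e) 'w' = (x, y + 1, last, m, n, j, e) from rfl]
              rw [ih hrest]
              simp [List.count_cons] <;> omega
            · rw [show wasdStepA (x, y, last, m, n, j, e) c = (x, y, last, m, n, j, e) by
                simp [wasdStepA, ha, hd, hs, hw, hj, hc]]
              rw [ih hrest]
              have hj' : ¬ 'j' = c := fun h => hj h.symm
              simp [List.count_cons, ha, hd, hs, hw, hj, hj']

theorem wasdSplit_nospace (seg : List Char) (h : ' ' ∉ seg) : wasdSplit seg = [seg] := by
  induction seg with
  | nil => rfl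
  | cons c rest ih =>
    have hc : ¬ c = ' ' := fun hh => h (by simp [hh])
    have hrest : ' ' ∉ rest := fun hh => h (by simp [hh])
    simp only [wasdSplit, if_neg hc, ih hrest]

theorem wasdSplit_append (seg rest : List Char) (h : ' ' ∉ seg) :
    wasdSplit (seg ++ ' ' :: rest) = seg :: wasdSplit rest := by
  induction seg with
  | nil => simp [wasdSplit]
  | cons c seg' ih =>
    have hc : ¬ c = ' ' := fun hh => h (by simp [hh])
    have hseg : ' ' ∉ seg' := fun hh => h (by simp [hh])
    simp only [List.cons_append, wasdSplit, if_neg hc, ih hseg]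

theorem exists_space_split (cs : List Char) (h : ' ' ∈ cs) :
    ∃ seg rest, cs = seg ++ ' ' :: rest ∧ ' ' ∉ seg := by
  induction cs with
  | nil => simp at h
  | cons c rest ih =>
    by_cases hc : c = ' '
    · exact ⟨[], rest, by simp [hc], by simp⟩
    · have : ' ' ∈ rest := by
        rcases List.mem_cons.mp h with h1 | h1
        · exact absurd h1.symm hc
        · exact h1
      obtain ⟨seg, r, hr, hn⟩ := ih this
      exact ⟨c :: seg, r, by simp [hr], by simp [hn]; exact fun hh => hc hh.symm⟩

-- main invariant: A's char fold = B's fold over the committed segments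
theorem main_fold : ∀ (N : Nat) (cs : List Char), cs.length ≤ N →
    ∀ (x y : Int) (last : Int × Int)
    (m : PySem.Dict (Int × Int) Int) (n : Int) (e : PySem.Set (Int × Int)),
    (List.foldl wasdStepA (x, y, last, m, n, false, e) cs).2.2.2.2.2.2 =
      (List.foldl wasdStepB' (x, y, m, n, last, e) (wasdSplit cs).dropLast).2.2.2.2.2 := by
  intro N
  induction N with
  | zero =>
    intro cs h x y last m n e
    cases cs with
    | nil => simp [wasdSplit]
    | cons c t => exact absurd h (by simp)
  | succ N ih =>
    intro cs h x y last m n e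
    by_cases hsp : ' ' ∈ cs
    · obtain ⟨seg, rest, rfl, hns⟩ := exists_space_split cs hsp
      have hlen : rest.length ≤ N := by
        rw [List.length_append, List.length_cons] at h; omega
      rw [List.foldl_append, foldA_nospace _ hns, wasdSplit_append _ _ hns]
      obtain ⟨p, ps, hps⟩ := wasdSplit_cons' rest
      have hdrop : (seg :: wasdSplit rest).dropLast = seg :: (wasdSplit rest).dropLast := by
        rw [hps]; rfl
      rw [hdrop]
      simp only [List.foldl_cons, Bool.false_or]
      rw [show ∀ (a b : Int) (jm : Bool),
            wasdStepA (a, b, last, m, n, jm, e) ' ' =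
              (a, b, (a, b),
               (if m.contains (a, b) then m else m.insert (a, b) n),
               (if m.contains (a, b) then n else n + 1), false,
               (if jm then e else e.add
                 ((if m.contains (a, b) then m else m.insert (a, b) n).getD last 0,
                  (if m.contains (a, b) then m else m.insert (a, b) n).getD (a, b) 0)))
          from fun a b jm => rfl]
      rw [ih rest hlen]
      rfl
    · rw [wasdSplit_nospace cs hsp]
      rw [foldA_nospace _ hsp]
      simp
-- ===== VERDICT (by name: the statement is the Claim_ definition above) =====
theorem foldB_eq_foldB' : ∀ (l : List String) (st : WasdStB),
    List.foldl wasdStepB st l = List.foldl wasdStepB' st (l.map String.toList) := by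
  intro l
  induction l with
  | nil => intro st; rfl
  | cons a t ih => intro st; simp only [List.map_cons, List.foldl_cons, stepB_eq_stepB', ih]

theorem wasd_code_graph_spec : Claim_equal_wasd_code_graph := by
  intro s _
  show wasd_code_graph s = wasd_code_graph_alt s
  have hchars : PySem.Chars.split? s.toList " ".toList = some (wasdSplit s.toList) := by
    rw [PySem.Chars.split?]
    simp [splitOn_eq_wasdSplit]
  obtain ⟨L, hL, hmap⟩ : ∃ L, PySem.Str.split? s " " = some L ∧
      L.map String.toList = wasdSplit s.toList := by
    have h := PySem.Str.split?_map s " "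
    rw [hchars] at h
    cases hX : PySem.Str.split? s " " with
    | none => rw [hX] at h; simp at h
    | some L =>
      rw [hX] at h
      simp only [Option.map_some, Option.some.injEq] at h
      exact ⟨L, rfl, h⟩
  rw [wasd_code_graph, wasd_code_graph_alt, hL]
  simp only [Option.getD_some]
  rw [slice_neg_one, foldB_eq_foldB', List.map_dropLast, hmap]
  exact main_fold s.toList.length s.toList le_rfl 0 0 (0, 0) _ 1 []
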